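-- pv_equiv track=rewrite | github.com/SAlgorithmStudy6/AlgorithmStudy | 2022/08.01/이지윤/[BOJ_11725]트리의부모찾기_graph_bad.py | dfs
-- ===== SOURCE A (Python) =====
-- def dfs(_n, _graph) -> list:
--     parentNode = [0]*(_n+1)     # 노드 번호 = 인덱스+1
--     parentNode[1],stack = 1, [1]
--     while stack:
--         node = stack.pop()
--         for _v in _graph.get(node):
--             if parentNode[_v] : continue
--             parentNode[_v] = node
--             stack.append(_v)
--     return parentNode
-- ===== SOURCE B (Python) =====
-- def dfs(_n, _graph) -> list:
--     parentNode = [0] * (_n + 1)     # node number = index; root 1 is its own parent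
--     parentNode[1] = 1
--
--     def visit(node):
--         children = []
--         for v in _graph.get(node):
--             if parentNode[v]:
--                 continue
--             parentNode[v] = node
--             children.append(v)
--         for v in reversed(children):   # stack (LIFO) expansion order
--             visit(v)
--
--     visit(1)
--     return parentNode
-- ===== Notes on version B (the rewrite author's own statement) =====
-- stated objective: alternative
-- what changed: The explicit while-loop over a stack is replaced by a recursive visit(node) that marks a node's unvisited children in the parent array and then recurses into them in stack (LIFO) order.
-- outside the precondition, e.g. on dfs(2, {1: [2, -1], 2: []}): A returns [0, 1, 1], B returns [0, 1, 1]; on dfs(2, {1: [0], 0: []}): A returns [1, 1, 0], B returns [1, 1, 0]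
import Mathlib
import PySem

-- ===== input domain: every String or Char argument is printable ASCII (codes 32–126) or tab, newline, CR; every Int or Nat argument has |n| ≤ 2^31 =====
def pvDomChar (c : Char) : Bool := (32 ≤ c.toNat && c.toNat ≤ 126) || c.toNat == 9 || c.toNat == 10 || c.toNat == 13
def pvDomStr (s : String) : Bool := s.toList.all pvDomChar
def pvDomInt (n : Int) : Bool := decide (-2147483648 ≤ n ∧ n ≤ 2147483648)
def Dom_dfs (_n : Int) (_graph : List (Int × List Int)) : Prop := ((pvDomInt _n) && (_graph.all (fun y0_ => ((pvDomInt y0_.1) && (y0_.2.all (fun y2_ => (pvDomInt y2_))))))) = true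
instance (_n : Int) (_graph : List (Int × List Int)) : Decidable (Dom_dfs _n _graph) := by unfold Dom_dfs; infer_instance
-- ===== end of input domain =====

-- B replaces A's explicit stack loop by a recursive visit that marks a node's unvisited
-- children and then recurses into them in stack (LIFO) order; same values, different decomposition.

-- ===== PORT A =====
-- the inner 'for _v in _graph.get(node)' loop: reads parentNode[_v], marks new nodes,
-- conses them onto the stack (head of the list = top of Python's stack);
-- 'none' = the IndexError Python raises on an out-of-range parentNode[_v]
def dfsScan (node : Int) : List Int → List Int → List Int → Option (List Int × List Int)
  | P, stack, [] => some (P, stack)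
  | P, stack, v :: vs =>
    match PySem.List.pyGet? P v with
    | none => none
    | some x =>
      if x ≠ 0 then dfsScan node P stack vs
      else dfsScan node (PySem.List.pySetD P v node) (v :: stack) vs

-- the 'while stack' loop; fuel only makes the recursion total ('none' = fuel out, or the
-- TypeError Python raises when _graph.get(node) is None, or the scan's IndexError)
def dfsGo (g : List (Int × List Int)) : Nat → List Int → List Int → Option (List Int)
  | 0, _, _ => none
  | f + 1, P, stack =>
    match stack with
    | [] => some P
    | node :: t =>
      match (PySem.Dict.mk g).get? node with
      | none => none
      | some vs =>
        match dfsScan node P t vs with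
        | none => none
        | some (P', s') => dfsGo g f P' s'

def dfs (_n : Int) (_graph : List (Int × List Int)) : List Int :=
  let P0 := List.replicate (_n + 1).toNat (0 : Int)
  match PySem.List.pySet? P0 1 1 with          -- parentNode[1] = 1 (IndexError if _n < 1)
  | none => []                                 -- Python raises here: outside Pre_
  | some P1 =>
    match dfsGo _graph ((_n + 1).toNat + 1) P1 [1] with
    | none => []                               -- Python raises here: outside Pre_
    | some P => P

-- ===== PORT B =====
-- the 'for v in _graph.get(node)' loop of B's visit: marks new children and appends them
def dfsCollect (node : Int) : List Int → List Int → List Int → Option (List Int × List Int)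
  | P, acc, [] => some (P, acc)
  | P, acc, v :: vs =>
    match PySem.List.pyGet? P v with
    | none => none
    | some x =>
      if x ≠ 0 then dfsCollect node P acc vs
      else dfsCollect node (PySem.List.pySetD P v node) (acc ++ [v]) vs

mutual
-- B's recursive visit(node); fuel only makes the recursion total
def dfsVisit (g : List (Int × List Int)) : Nat → List Int → Int → Option (List Int)
  | 0, _, _ => none
  | f + 1, P, node =>
    match (PySem.Dict.mk g).get? node with
    | none => none
    | some vs =>
      match dfsCollect node P [] vs with
      | none => none
      | some (P', children) => dfsVisitRev g f P' children.reverse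
  termination_by f _ _ => (f, 0)

-- 'for v in reversed(children): visit(v)' (the argument list is already reversed)
def dfsVisitRev (g : List (Int × List Int)) : Nat → List Int → List Int → Option (List Int)
  | _, P, [] => some P
  | f, P, v :: rest =>
    match dfsVisit g f P v with
    | none => none
    | some P' => dfsVisitRev g f P' rest
  termination_by f _ l => (f, l.length + 1)
end

def dfs_alt (_n : Int) (_graph : List (Int × List Int)) : List Int :=
  let P0 := List.replicate (_n + 1).toNat (0 : Int)
  match PySem.List.pySet? P0 1 1 with
  | none => []
  | some P1 =>
    match dfsVisit _graph ((_n + 1).toNat + 1) P1 1 with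
    | none => []
    | some P => P

-- ===== PRECONDITION & SPEC =====
-- a plain neighbourhood closure of {1} through the dict (no parent array, no order):
-- an over-approximation of the nodes the traversal can ever expand
def pvStep (g : List (Int × List Int)) (S : List Int) : List Int :=
  S.foldl (fun acc u =>
    match (PySem.Dict.mk g).get? u with
    | some vs => PySem.Set.update acc vs
    | none => acc) S

def pvReach (g : List (Int × List Int)) : List Int := (pvStep g)^[g.length + 2] [1]

-- Pre_ excludes exactly the inputs on which A raises (_n < 1, key 1 missing, a reachable
-- adjacency value whose parentNode index is out of 0.._n, or a reachable non-root value
-- missing from the dict), and in addition the reachable adjacency values 0 and the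
-- negative ones that A survives only through Python's list-index wraparound: those are
-- not node numbers, and the claim covers the tree domain 1.._n (B happens to agree there).
def Pre_dfs (_n : Int) (_graph : List (Int × List Int)) : Prop :=
  1 ≤ _n ∧ (((PySem.Dict.mk _graph).get? 1).isSome = true) ∧
  ∀ u ∈ pvReach _graph, ∀ v ∈ ((PySem.Dict.mk _graph).get? u).getD [],
    1 ≤ v ∧ v ≤ _n ∧ (v = 1 ∨ ((PySem.Dict.mk _graph).get? v).isSome = true) ∧ v ∈ pvReach _graph

instance (_n : Int) (_graph : List (Int × List Int)) : Decidable (Pre_dfs _n _graph) := by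
  unfold Pre_dfs; infer_instance

def pvWitness_dfs : Int × (List (Int × List Int)) := (3, [(1, [2, 3]), (2, []), (3, [])])

def Spec_dfs (_n : Int) (_graph : List (Int × List Int)) (out : List Int) : Prop := out = dfs_alt _n _graph
instance (_n : Int) (_graph : List (Int × List Int)) (out : List Int) : Decidable (Spec_dfs _n _graph out) := by unfold Spec_dfs; infer_instance

-- ===== CLAIM (what is proved, stated in full; the proofs are below) =====
def Claim_equal_dfs : Prop := ∀ (_n : Int) (_graph : List (Int × List Int)), Dom_dfs _n _graph → Pre_dfs _n _graph → Spec_dfs _n _graph (dfs _n _graph)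

-- ===== LEMMAS AND PROOFS =====

theorem pv_count_set (l : List Int) (k : Nat) (x : Int) (hk : l[k]? = some 0) (hx : x ≠ 0) :
    (l.set k x).count 0 + 1 = l.count 0 := by
  induction l generalizing k with
  | nil => simp at hk
  | cons a tl ih =>
    cases k with
    | zero =>
      simp only [List.getElem?_cons_zero, Option.some_inj] at hk
      subst hk
      simp [hx]
    | succ k =>
      simp only [List.getElem?_cons_succ] at hk
      have := ih k hk
      simp only [List.set_cons_succ, List.count_cons]
      split <;> omega

theorem pv_mem_update {acc : List Int} {x : Int} (hx : x ∈ acc) (vs : List Int) :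
    x ∈ PySem.Set.update acc vs := by
  induction vs generalizing acc with
  | nil => exact hx
  | cons v vs ih =>
    have : x ∈ PySem.Set.add acc v := (PySem.Set.mem_add acc v x).mpr (Or.inl hx)
    simpa [PySem.Set.update] using ih (acc := PySem.Set.add acc v) this

theorem pv_mem_foldl_step {g : List (Int × List Int)} {x : Int} :
    ∀ (L : List Int) (acc : List Int), x ∈ acc →
      x ∈ L.foldl (fun acc u =>
        match (PySem.Dict.mk g).get? u with
        | some vs => PySem.Set.update acc vs
        | none => acc) acc := by
  intro L
  induction L with
  | nil => intro acc h; exact h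
  | cons u L ih =>
    intro acc h
    apply ih
    rcases hu : (PySem.Dict.mk g).get? u with _ | vs
    · simp only [hu]; exact h
    · simp only [hu]; exact pv_mem_update h vs

theorem pv_mem_pvStep {g : List (Int × List Int)} {S : List Int} {x : Int} (hx : x ∈ S) :
    x ∈ pvStep g S := pv_mem_foldl_step S S hx

theorem pv_one_mem_pvReach (g : List (Int × List Int)) : 1 ∈ pvReach g := by
  unfold pvReach
  generalize g.length + 2 = k
  induction k with
  | zero => simp
  | succ k ih =>
    rw [Function.iterate_succ_apply']
    exact pv_mem_pvStep ih

-- scan = collect, with the collected children consed (reversed) onto the stack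
theorem pv_scan_eq_collect (node : Int) :
    ∀ (vs P acc t : List Int),
      dfsScan node P (acc.reverse ++ t) vs =
        (dfsCollect node P acc vs).map (fun pc => (pc.1, pc.2.reverse ++ t)) := by
  intro vs
  induction vs with
  | nil => intro P acc t; simp [dfsScan, dfsCollect]
  | cons v vs ih =>
    intro P acc t
    simp only [dfsScan, dfsCollect]
    rcases hv : PySem.List.pyGet? P v with _ | x
    · simp
    · simp only []
      split
      · exact ih P acc t
      · have := ih (PySem.List.pySetD P v node) (acc ++ [v]) t
        simpa [List.reverse_append] using this

-- fuel monotonicity of B's recursion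
theorem pv_visit_mono (g : List (Int × List Int)) :
    ∀ (f : Nat),
      (∀ (P : List Int) (v : Int) (r : List Int), dfsVisit g f P v = some r → dfsVisit g (f+1) P v = some r) ∧
      (∀ (P l r : List Int), dfsVisitRev g f P l = some r → dfsVisitRev g (f+1) P l = some r) := by
  intro f
  induction f with
  | zero =>
    constructor
    · intro P v r h; simp [dfsVisit] at h
    · intro P l r h
      cases l with
      | nil => simpa [dfsVisitRev] using h
      | cons v rest => simp [dfsVisitRev, dfsVisit] at h
  | succ f ih =>
    have hS : ∀ (P : List Int) (v : Int) (r : List Int),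
        dfsVisit g (f+1) P v = some r → dfsVisit g (f+2) P v = some r := by
      intro P v r h
      simp only [dfsVisit] at h ⊢
      rcases hg : (PySem.Dict.mk g).get? v with _ | vs <;> simp only [hg] at h ⊢
      · exact h
      · rcases hc : dfsCollect v P [] vs with _ | pc <;> simp only [hc] at h ⊢
        · exact h
        · exact ih.2 _ _ _ h
    refine ⟨hS, ?_⟩
    intro P l
    induction l generalizing P with
    | nil => intro r h; simpa [dfsVisitRev] using h
    | cons v rest ihl =>
      intro r h
      simp only [dfsVisitRev] at h ⊢
      rcases hv : dfsVisit g (f+1) P v with _ | P₁ <;> simp only [hv] at h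
      · exact absurd h (by simp)
      · rw [hS _ _ _ hv]
        exact ihl _ _ h

theorem pv_visitRev_append (g : List (Int × List Int)) :
    ∀ (l₁ : List Int) (f : Nat) (P l₂ r : List Int), dfsVisitRev g f P (l₁ ++ l₂) = some r →
      ∃ m, dfsVisitRev g f P l₁ = some m ∧ dfsVisitRev g f m l₂ = some r := by
  intro l₁
  induction l₁ with
  | nil => intro f P l₂ r h; exact ⟨P, by simp [dfsVisitRev], h⟩
  | cons v l₁ ih =>
    intro f P l₂ r h
    simp only [List.cons_append, dfsVisitRev] at h
    rcases hv : dfsVisit g f P v with _ | P₁ <;> simp only [hv] at h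
    · exact absurd h (by simp)
    · obtain ⟨m, hm1, hm2⟩ := ih f P₁ l₂ r h
      exact ⟨m, by simp only [dfsVisitRev, hv]; exact hm1, hm2⟩

-- the simulation: whatever A's stack loop returns, B's recursion returns too
theorem pv_go_eq_visitRev (g : List (Int × List Int)) :
    ∀ (f : Nat) (P s r : List Int), dfsGo g f P s = some r → dfsVisitRev g f P s = some r := by
  intro f
  induction f with
  | zero => intro P s r h; simp [dfsGo] at h
  | succ f ih =>
    intro P s r h
    cases s with
    | nil =>
      simp only [dfsGo, Option.some_inj] at h
      simp [dfsVisitRev, h]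
    | cons node t =>
      simp only [dfsGo] at h
      rcases hg : (PySem.Dict.mk g).get? node with _ | vs <;> simp only [hg] at h
      · exact absurd h (by simp)
      · rcases hs : dfsScan node P t vs with _ | Ps <;> simp only [hs] at h
        · exact absurd h (by simp)
        · obtain ⟨P₀, s₀⟩ := Ps
          have hsc := pv_scan_eq_collect node vs P [] t
          simp only [List.reverse_nil, List.nil_append] at hsc
          rw [hs] at hsc
          rcases hc : dfsCollect node P [] vs with _ | pc
          · rw [hc] at hsc; simp at hsc
          · obtain ⟨P', c⟩ := pc
            rw [hc] at hsc
            simp only [Option.map_some] at hsc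
            obtain ⟨hP, hst⟩ : P₀ = P' ∧ s₀ = c.reverse ++ t := by
              have := Option.some_inj.mp hsc
              exact ⟨congrArg Prod.fst this, congrArg Prod.snd this⟩
            subst hP hst
            have hrev := ih _ _ _ h
            obtain ⟨m, hm1, hm2⟩ := pv_visitRev_append g c.reverse f P₀ t r hrev
            simp only [dfsVisitRev, dfsVisit, hg, hc]
            rw [hm1]
            exact (pv_visit_mono g f).2 _ _ _ hm2

-- the inner scan under Pre_: never raises, pushes only good reachable nodes, and every
-- push turns exactly one zero cell nonzero
theorem pv_scan_spec (g : List (Int × List Int)) (_n node : Int) (hn : 1 ≤ _n) (hnode : 1 ≤ node) :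
    ∀ (vs P t : List Int),
      (∀ v ∈ vs, 1 ≤ v ∧ v ≤ _n ∧ (v = 1 ∨ ((PySem.Dict.mk g).get? v).isSome = true) ∧ v ∈ pvReach g) →
      P.length = (_n + 1).toNat → P[1]? = some 1 →
      ∃ P' s₀, dfsScan node P t vs = some (P', s₀ ++ t) ∧
        P'.length = (_n + 1).toNat ∧ P'[1]? = some 1 ∧
        (∀ w ∈ s₀, w ∈ pvReach g ∧ ((PySem.Dict.mk g).get? w).isSome = true ∧ 1 ≤ w ∧ w ≤ _n) ∧
        P'.count 0 + s₀.length = P.count 0 := by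
  intro vs
  induction vs with
  | nil =>
    intro P t _ hlen h1
    exact ⟨P, [], by simp [dfsScan], hlen, h1, by simp, by simp⟩
  | cons v vs ih =>
    intro P t hvs hlen h1
    obtain ⟨hv1, hv2, hv3, hv4⟩ := hvs v (by simp)
    have hkn : v.toNat < P.length := by omega
    have hget : PySem.List.pyGet? P v = some P[v.toNat] := by
      rw [PySem.List.pyGet?_of_nonneg P (by omega)]
      exact List.getElem?_eq_getElem hkn
    simp only [dfsScan, hget]
    by_cases hz : P[v.toNat] = 0
    · -- new node: mark it and push it
      have hvne1 : v ≠ 1 := by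
        intro hv; subst hv
        have hz' : P[1] = 0 := by simpa using hz
        have hx := List.getElem?_eq_getElem (l := P) (i := 1) (by simpa using hkn)
        rw [h1, hz'] at hx
        simp at hx
      have hk1 : v.toNat ≠ 1 := by omega
      have hset : PySem.List.pySetD P v node = P.set v.toNat node :=
        PySem.List.pySetD_of_nonneg P node (by omega)
      have hvs' : ∀ w ∈ vs, 1 ≤ w ∧ w ≤ _n ∧ (w = 1 ∨ ((PySem.Dict.mk g).get? w).isSome = true) ∧ w ∈ pvReach g :=
        fun w hw => hvs w (by simp [hw])
      obtain ⟨P', s₀', hscan, hlen', h1', hgood', hcnt⟩ :=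
        ih (P.set v.toNat node) (v :: t) hvs' (by simpa using hlen)
          (by rw [List.getElem?_set_ne (by omega)]; exact h1)
      refine ⟨P', s₀' ++ [v], ?_, hlen', h1', ?_, ?_⟩
      · rw [if_neg (by simp [hz]), hset, hscan]
        simp
      · intro w hw
        rcases List.mem_append.mp hw with hw | hw
        · exact hgood' w hw
        · have : w = v := by simpa using hw
          subst this
          exact ⟨hv4, hv3.resolve_left hvne1, hv1, hv2⟩
      · have hcset : (P.set v.toNat node).count 0 + 1 = P.count 0 :=
          pv_count_set P v.toNat node (by rw [List.getElem?_eq_getElem hkn, hz]) (by omega)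
        simp only [List.length_append, List.length_cons, List.length_nil] at hcnt ⊢
        omega
    · -- already has a parent: skip
      rw [if_pos hz]
      exact ih P t (fun w hw => hvs w (by simp [hw])) hlen h1

-- fuel sufficiency / no raise for A's loop under Pre_
theorem pv_go_some (g : List (Int × List Int)) (_n : Int) (hPre : Pre_dfs _n g) :
    ∀ (f : Nat) (P s : List Int),
      P.length = (_n + 1).toNat → P[1]? = some 1 →
      (∀ w ∈ s, w ∈ pvReach g ∧ ((PySem.Dict.mk g).get? w).isSome = true ∧ 1 ≤ w ∧ w ≤ _n) →
      s.length + P.count 0 < f →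
      ∃ r, dfsGo g f P s = some r := by
  intro f
  induction f with
  | zero => intro P s _ _ _ hm; omega
  | succ f ih =>
    intro P s hlen h1 hgood hm
    cases s with
    | nil => exact ⟨P, by simp [dfsGo]⟩
    | cons node t =>
      obtain ⟨hr, hsome, hn1, hn2⟩ := hgood node (by simp)
      obtain ⟨vs, hg⟩ := Option.isSome_iff_exists.mp hsome
      have hvs : ∀ v ∈ vs, 1 ≤ v ∧ v ≤ _n ∧ (v = 1 ∨ ((PySem.Dict.mk g).get? v).isSome = true) ∧ v ∈ pvReach g := by
        intro v hv
        have := hPre.2.2 node hr v (by rw [hg]; simpa using hv)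
        exact this
      obtain ⟨P', s₀, hscan, hlen', h1', hgood', hcnt⟩ :=
        pv_scan_spec g _n node hPre.1 hn1 vs P t hvs hlen h1
      have hm' : (s₀ ++ t).length + P'.count 0 < f := by
        simp only [List.length_append, List.length_cons] at hm ⊢
        omega
      have hgoods : ∀ w ∈ s₀ ++ t, w ∈ pvReach g ∧ ((PySem.Dict.mk g).get? w).isSome = true ∧ 1 ≤ w ∧ w ≤ _n := by
        intro w hw
        rcases List.mem_append.mp hw with hw | hw
        · exact hgood' w hw
        · exact hgood w (by simp [hw])
      obtain ⟨r, hr'⟩ := ih P' (s₀ ++ t) hlen' h1' hgoods hm'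
      exact ⟨r, by simp only [dfsGo, hg, hscan]; exact hr'⟩

-- ===== VERDICT (by name: the statement is the Claim_ definition above) =====
theorem dfs_spec : Claim_equal_dfs := by
  unfold Claim_equal_dfs
  intro _n g _hDom hPre
  obtain ⟨hn, h1s, hcl⟩ := hPre
  unfold Spec_dfs dfs dfs_alt
  simp only []
  set N := (_n + 1).toNat with hNdef
  have hN : 2 ≤ N := by omega
  have hset : PySem.List.pySet? (List.replicate N (0 : Int)) 1 1
      = some ((List.replicate N (0 : Int)).set 1 1) := by
    have := PySem.List.pySet?_natCast (List.replicate N (0 : Int)) 1 1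
      (by simpa using (by omega : 1 < N))
    simpa using this
  set P1 := (List.replicate N (0 : Int)).set 1 1 with hP1
  have hlen : P1.length = N := by simp [hP1]
  have h1 : P1[1]? = some 1 := by
    rw [hP1]
    exact List.getElem?_set_self (by simpa using (by omega : 1 < N))
  have hcnt : P1.count 0 + 1 = N := by
    have := pv_count_set (List.replicate N (0 : Int)) 1 1
      (by simp [List.getElem?_replicate]; omega) one_ne_zero
    simpa [hP1] using this
  obtain ⟨r, hr⟩ := pv_go_some g _n ⟨hn, h1s, hcl⟩ (N + 1) P1 [1] hlen h1
    (by
      intro w hw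
      have hw1 : w = 1 := by simpa using hw
      subst hw1
      exact ⟨pv_one_mem_pvReach g, h1s, le_refl 1, hn⟩)
    (by simp only [List.length_cons, List.length_nil]; omega)
  have hrev := pv_go_eq_visitRev g (N + 1) P1 [1] r hr
  have hv : dfsVisit g (N + 1) P1 1 = some r := by
    simp only [dfsVisitRev] at hrev
    rcases hx : dfsVisit g (N + 1) P1 1 with _ | m <;> rw [hx] at hrev
    · exact absurd hrev (by simp)
    · exact hrev
  rw [hset]
  simp only [hr, hv]
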